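-- pv_equiv track=rewrite | github.com/MarcinGladkowski/advent_of_code_2023 | day_14/main.py | slide_partial_right_and_south
-- ===== SOURCE A (Python) =====
-- def slide_partial_right_and_south(row: str):
--
--     row = row[::-1]
--     stones_count = list(filter(lambda x: x == 'O', row))
--
--     new_row = []
--     for i, el in enumerate(row):
--         if el == '#':
--             new_row.append('#')
--             continue
--         if stones_count:
--             new_row.append('O')
--             stones_count.pop()
--             continue
--         if el == 'O':
--             new_row.append('.')
--             continue
--         new_row.append(el)
--
--     new_row = new_row[::-1]
--     return new_row
-- ===== SOURCE B (Python) =====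
-- def slide_partial_right_and_south(row: str):
--     budget = row.count('O')
--     rebuilt = []
--     for seg in row[::-1].split('#'):
--         fill = min(budget, len(seg))
--         budget -= fill
--         rebuilt.append('O' * fill + ''.join('.' if c == 'O' else c for c in seg[fill:]))
--     return list('#'.join(rebuilt)[::-1])
-- ===== Notes on version B (the rewrite author's own statement) =====
-- stated objective: alternative
-- what changed: B replaces A's per-character loop with a mutating stone list by a segment-wise rebuild: count the stones once, split the reversed row at the fixed rocks, fill each segment from a shared numeric budget, and re-join.
import Mathlib
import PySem

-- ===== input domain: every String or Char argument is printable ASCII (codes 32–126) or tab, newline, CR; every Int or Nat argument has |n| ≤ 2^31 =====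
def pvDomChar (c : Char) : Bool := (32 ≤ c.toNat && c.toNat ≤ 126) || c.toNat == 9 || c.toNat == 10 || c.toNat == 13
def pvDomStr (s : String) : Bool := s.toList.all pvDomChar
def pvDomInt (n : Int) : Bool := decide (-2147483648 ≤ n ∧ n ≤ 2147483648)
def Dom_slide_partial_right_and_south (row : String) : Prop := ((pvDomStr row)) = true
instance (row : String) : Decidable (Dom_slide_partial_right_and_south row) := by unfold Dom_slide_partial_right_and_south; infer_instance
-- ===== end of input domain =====

-- B rebuilds the row segment-wise (split on '#', fill each segment from a shared stone budget) instead of A's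
-- per-character loop over a shrinking stone list; objective: alternative decomposition, same cost.

-- ===== PORT A =====
-- the body of A's 'for i, el in enumerate(row)' loop; state = (stones_count, new_row)
def pvAStep (st : List Char × List Char) (p : Int × Char) : List Char × List Char :=
  if p.2 = '#' then (st.1, st.2 ++ ['#'])
  else if st.1.isEmpty = false then (st.1.dropLast, st.2 ++ ['O'])   -- stones_count.pop() pops the last element
  else if p.2 = 'O' then (st.1, st.2 ++ ['.'])
  else (st.1, st.2 ++ [p.2])

def slide_partial_right_and_south (row : String) : List String :=
  let rowR : List Char := (PySem.List.slice? row.toList none none (-1)).getD []   -- row = row[::-1]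
  let stones0 : List Char := rowR.filter (fun x => x == 'O')
  let res := (PySem.List.enumerate rowR).foldl pvAStep (stones0, [])
  ((PySem.List.slice? res.2 none none (-1)).getD []).map (fun c => String.ofList [c])   -- new_row[::-1], a list of 1-char strings

-- ===== PORT B =====
-- the body of B's 'for seg in …' loop; state = (budget, rebuilt)
def pvBStep (st : Nat × List (List Char)) (seg : List Char) : Nat × List (List Char) :=
  let fill := min st.1 seg.length
  (st.1 - fill,
   st.2 ++ [List.replicate fill 'O' ++
            ((PySem.List.slice seg (some (fill : Int)) none).map (fun c => if c = 'O' then '.' else c))])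

def slide_partial_right_and_south_alt (row : String) : List String :=
  let budget0 := PySem.Chars.count row.toList ['O']                               -- row.count('O')
  let rowR : List Char := (PySem.List.slice? row.toList none none (-1)).getD []   -- row[::-1]
  let segs := PySem.Chars.splitOn rowR ['#']                                      -- .split('#')
  let res := segs.foldl pvBStep (budget0, [])
  ((PySem.List.slice? (PySem.Chars.join ['#'] res.2) none none (-1)).getD []).map (fun c => String.ofList [c])

-- ===== PRECONDITION & SPEC =====
def Spec_slide_partial_right_and_south (row : String) (out : List String) : Prop := out = slide_partial_right_and_south_alt row
instance (row : String) (out : List String) : Decidable (Spec_slide_partial_right_and_south row out) := by unfold Spec_slide_partial_right_and_south; infer_instance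

-- ===== CLAIM (what is proved, stated in full; the proofs are below) =====
def Claim_equal_slide_partial_right_and_south : Prop := ∀ (row : String), Dom_slide_partial_right_and_south row → Spec_slide_partial_right_and_south row (slide_partial_right_and_south row)

-- ===== LEMMAS AND PROOFS =====

-- reference model: slide with a numeric stone budget
def pvModel : List Char → Nat → List Char
  | [], _ => []
  | c :: t, k =>
    if c = '#' then '#' :: pvModel t k
    else match k with
      | 0 => (if c = 'O' then '.' else c) :: pvModel t 0
      | k' + 1 => 'O' :: pvModel t k'

-- reference split on '#'
def pvSplit : List Char → List (List Char)
  | [] => [[]]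
  | c :: t =>
    if c = '#' then [] :: pvSplit t
    else match pvSplit t with
      | [] => [[c]]
      | s :: ss => (c :: s) :: ss

lemma pvSplit_ne_nil (l : List Char) : pvSplit l ≠ [] := by
  cases l with
  | nil => simp [pvSplit]
  | cons c t =>
    simp only [pvSplit]
    split_ifs
    · simp
    · cases pvSplit t <;> simp

lemma pvSplitOn_go_spec (l : List Char) : ∀ (fuel : Nat) (cur : List Char) (acc : List (List Char)),
    l.length ≤ fuel →
    PySem.Chars.splitOn.go ['#'] fuel l cur acc =
      acc.reverse ++ (cur.reverse ++ (pvSplit l).headI) :: (pvSplit l).tail := by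
  induction l with
  | nil =>
    intro fuel cur acc _
    cases fuel <;> simp [PySem.Chars.splitOn.go, pvSplit]
  | cons c t ih =>
    intro fuel cur acc hf
    cases fuel with
    | zero => simp at hf
    | succ f =>
      by_cases hc : c = '#'
      · subst hc
        have : (['#'] : List Char).isPrefixOf ('#' :: t) = true := by simp [List.isPrefixOf]
        simp only [PySem.Chars.splitOn.go, this, if_pos]
        rw [show List.drop (['#'] : List Char).length ('#' :: t) = t by simp]
        rw [ih f [] (cur.reverse :: acc) (by simpa using hf)]
        have hne := pvSplit_ne_nil t
        cases hs : pvSplit t with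
        | nil => exact absurd hs hne
        | cons s ss => simp [pvSplit, hs]
      · have : (['#'] : List Char).isPrefixOf (c :: t) = false := by
          simp [List.isPrefixOf, Ne.symm hc]
        simp only [PySem.Chars.splitOn.go, this]
        rw [if_neg (by simp)]
        rw [ih f (c :: cur) acc (by simpa using hf)]
        have hne := pvSplit_ne_nil t
        cases hs : pvSplit t with
        | nil => exact absurd hs hne
        | cons s ss => simp [pvSplit, hs, hc]

lemma pvSplitOn_eq (l : List Char) : PySem.Chars.splitOn l ['#'] = pvSplit l := by
  unfold PySem.Chars.splitOn
  rw [pvSplitOn_go_spec l (l.length + 1) [] [] (by omega)]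
  have hne := pvSplit_ne_nil l
  cases hs : pvSplit l with
  | nil => exact absurd hs hne
  | cons s ss => simp

lemma pvCount_go_spec (l : List Char) : ∀ (fuel acc : Nat), l.length ≤ fuel →
    PySem.Chars.count.go ['O'] fuel l acc = acc + l.count 'O' := by
  induction l with
  | nil => intro fuel acc _; cases fuel <;> simp [PySem.Chars.count.go]
  | cons c t ih =>
    intro fuel acc hf
    cases fuel with
    | zero => simp at hf
    | succ f =>
      by_cases hc : c = 'O'
      · subst hc
        have : (['O'] : List Char).isPrefixOf ('O' :: t) = true := by simp [List.isPrefixOf]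
        simp only [PySem.Chars.count.go, this, if_pos]
        rw [show List.drop (['O'] : List Char).length ('O' :: t) = t by simp]
        rw [ih f (acc + 1) (by simpa using hf)]
        simp
        omega
      · have : (['O'] : List Char).isPrefixOf (c :: t) = false := by
          simp [List.isPrefixOf, Ne.symm hc]
        simp only [PySem.Chars.count.go, this]
        rw [if_neg (by simp)]
        rw [ih f acc (by simpa using hf)]
        simp [hc]

lemma pvCount_eq (l : List Char) : PySem.Chars.count l ['O'] = l.count 'O' := by
  unfold PySem.Chars.count
  rw [if_neg (by simp)]
  rw [pvCount_go_spec l l.length 0 (le_refl _), Nat.zero_add]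

-- A's loop computes pvModel of the stone-list LENGTH
lemma pvA_loop_spec (l : List Char) : ∀ (i : Int) (stones acc : List Char),
    ((PySem.List.enumerate l i).foldl pvAStep (stones, acc)).2 = acc ++ pvModel l stones.length := by
  induction l with
  | nil => intro i stones acc; simp [PySem.List.enumerate_nil, pvModel]
  | cons c t ih =>
    intro i stones acc
    rw [PySem.List.enumerate_cons, List.foldl_cons]
    by_cases hc : c = '#'
    · subst hc
      have h1 : pvAStep (stones, acc) (i, '#') = (stones, acc ++ ['#']) := by
        simp [pvAStep]
      rw [h1, ih]
      simp [pvModel]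
    · cases hst : stones with
      | nil =>
        have h1 : pvAStep ([], acc) (i, c) = ([], acc ++ [if c = 'O' then '.' else c]) := by
          by_cases ho : c = 'O' <;> simp [pvAStep, hc, ho]
        rw [h1, ih]
        simp only [List.length_nil]
        rw [show pvModel (c :: t) 0 = (if c = 'O' then '.' else c) :: pvModel t 0 from by
          simp [pvModel, hc]]
        simp
      | cons s ss =>
        have h1 : pvAStep (s :: ss, acc) (i, c) = ((s :: ss).dropLast, acc ++ ['O']) := by
          simp [pvAStep, hc]
        rw [h1, ih]
        have hlen : (s :: ss).dropLast.length = ss.length := by simp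
        rw [hlen]
        rw [show pvModel (c :: t) (s :: ss).length = 'O' :: pvModel t ss.length from by
          simp [pvModel, hc]]
        simp

-- B's segment fold as a recursion
def pvG : List (List Char) → Nat → List (List Char)
  | [], _ => []
  | s :: ss, k =>
    (List.replicate (min k s.length) 'O' ++
      (s.drop (min k s.length)).map (fun c => if c = 'O' then '.' else c)) :: pvG ss (k - min k s.length)

lemma pvB_loop_spec (segs : List (List Char)) : ∀ (k : Nat) (out : List (List Char)),
    (segs.foldl pvBStep (k, out)).2 = out ++ pvG segs k := by
  induction segs with
  | nil => intro k out; simp [pvG]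
  | cons s ss ih =>
    intro k out
    rw [List.foldl_cons]
    show (ss.foldl pvBStep (pvBStep (k, out) s)).2 = _
    simp only [pvBStep]
    rw [ih]
    rw [PySem.List.slice_from_natCast]
    simp [pvG]

lemma pvJoin_cons_head (a : Char) (x : List Char) (rest : List (List Char)) :
    PySem.Chars.join ['#'] ((a :: x) :: rest) = a :: PySem.Chars.join ['#'] (x :: rest) := by
  cases rest with
  | nil => simp [PySem.Chars.join_singleton]
  | cons q r => rw [PySem.Chars.join_cons_cons, PySem.Chars.join_cons_cons]; simp

-- the glue: join '#' over the budget-threaded segments IS the budgeted slide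
lemma pvJoin_pvG_pvSplit (cs : List Char) : ∀ (k : Nat),
    PySem.Chars.join ['#'] (pvG (pvSplit cs) k) = pvModel cs k := by
  induction cs with
  | nil => intro k; simp [pvSplit, pvG, pvModel, PySem.Chars.join_singleton]
  | cons c t ih =>
    intro k
    by_cases hc : c = '#'
    · subst hc
      rw [show pvSplit ('#' :: t) = [] :: pvSplit t from by simp [pvSplit]]
      have hne := pvSplit_ne_nil t
      cases hs : pvSplit t with
      | nil => exact absurd hs hne
      | cons s ss =>
        have hG : pvG (s :: ss) k =
            (List.replicate (min k s.length) 'O' ++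
              (s.drop (min k s.length)).map (fun c => if c = 'O' then '.' else c)) ::
              pvG ss (k - min k s.length) := by
          simp [pvG]
        rw [show pvG ([] :: s :: ss) k = [] :: pvG (s :: ss) k from by simp [pvG], hG,
            PySem.Chars.join_cons_cons, ← hG, ← hs, ih k]
        simp [pvModel]
    · have hne := pvSplit_ne_nil t
      cases hs : pvSplit t with
      | nil => exact absurd hs hne
      | cons s ss =>
        rw [show pvSplit (c :: t) = (c :: s) :: ss from by simp [pvSplit, hc, hs]]
        cases k with
        | zero =>
          simp only [pvG, Nat.zero_min, List.replicate, List.drop_zero, Nat.sub_zero,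
            List.nil_append, List.map_cons]
          rw [pvJoin_cons_head]
          have := ih 0
          rw [hs] at this
          simp only [pvG, Nat.zero_min, List.replicate, List.drop_zero, Nat.sub_zero,
            List.nil_append] at this
          rw [this]
          simp [pvModel, hc]
        | succ m =>
          have hmin : min (m + 1) (s.length + 1) = min m s.length + 1 := by omega
          simp only [pvG, List.length_cons, hmin, List.replicate_succ, List.drop_succ_cons,
            List.cons_append]
          rw [pvJoin_cons_head]
          have hsub : m + 1 - (min m s.length + 1) = m - min m s.length := by omega
          rw [hsub]
          have := ih m
          rw [hs] at this
          simp only [pvG] at this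
          rw [this]
          simp [pvModel, hc]

-- ===== VERDICT (by name: the statement is the Claim_ definition above) =====
theorem slide_partial_right_and_south_spec : Claim_equal_slide_partial_right_and_south := by
  intro row _
  unfold Spec_slide_partial_right_and_south
  unfold slide_partial_right_and_south slide_partial_right_and_south_alt
  simp only [PySem.List.slice?_none_none_neg_one, Option.getD_some]
  rw [pvA_loop_spec, pvB_loop_spec, pvSplitOn_eq]
  simp only [List.nil_append]
  have hcnt : (List.filter (fun x => x == 'O') row.toList).length
      = PySem.Chars.count row.toList ['O'] := by
    rw [pvCount_eq, List.count_eq_countP, List.countP_eq_length_filter]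
  simp [hcnt, pvJoin_pvG_pvSplit]
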